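-- pv_equiv track=rewrite | github.com/jorgeumberto/scanner | plugins/upload_tester.py | _extract_last_response
-- ===== SOURCE A (Python) =====
-- from typing import Dict, Any, List, Tuple
--
-- def _extract_last_response(raw: str) -> Tuple[str, Dict[str, List[str]], str]:
--     """
--     A partir do texto de resposta de `curl -i -L`, extrai:
--     - último status code
--     - dict de cabeçalhos (lower, múltiplos valores)
--     - corpo (apenas da última resposta)
--     """
--     lines = raw.splitlines()
--     last_http = -1
--     for i, ln in enumerate(lines):
--         if ln.upper().startswith("HTTP/"):
--             last_http = i
--     if last_http == -1:
--         return "?", {}, raw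
--
--     headers: Dict[str, List[str]] = {}
--     status = "?"
--     end_headers_idx = len(lines) - 1
--     for j in range(last_http, len(lines)):
--         ln = lines[j]
--         if j == last_http:
--             parts = ln.split()
--             if len(parts) >= 2 and parts[1].isdigit():
--                 status = parts[1]
--             continue
--         if not ln.strip():
--             end_headers_idx = j
--             break
--         if ":" in ln:
--             name, val = ln.split(":", 1)
--             key = name.strip().lower()
--             val = val.strip()
--             headers.setdefault(key, []).append(val)
--
--     body = "\n".join(lines[end_headers_idx + 1:]) if end_headers_idx + 1 < len(lines) else ""
--     return status, headers, body
-- ===== SOURCE B (Python) =====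
-- from typing import Dict, List, Tuple
--
--
-- def _extract_last_response(raw: str) -> Tuple[str, Dict[str, List[str]], str]:
--     # One forward pass: a state machine that RESETS on every HTTP/ line, so at the
--     # end it holds the parse of the last response block only.
--     found = False
--     in_headers = True
--     status = "?"
--     headers: Dict[str, List[str]] = {}
--     body: List[str] = []
--     for ln in raw.splitlines():
--         if ln.upper().startswith("HTTP/"):
--             found = True
--             in_headers = True
--             parts = ln.split()
--             status = parts[1] if len(parts) >= 2 and parts[1].isdigit() else "?"
--             headers = {}
--             body = []
--         elif not found:
--             pass
--         elif in_headers: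
--             if not ln.strip():
--                 in_headers = False
--             elif ":" in ln:
--                 name, val = ln.split(":", 1)
--                 headers.setdefault(name.strip().lower(), []).append(val.strip())
--         else:
--             body.append(ln)
--     if not found:
--         return "?", {}, raw
--     return status, headers, "\n".join(body)
-- ===== Notes on version B (the rewrite author's own statement) =====
-- stated objective: alternative
-- what changed: A first scans all lines to locate the last HTTP/ marker and then re-walks indices from it with a break; B is a single forward-pass state machine (found/in_headers flags, accumulators) that resets its status/headers/body state whenever an HTTP/ line appears, so the final state is the last block's parse with no index search, slicing or second pass.
import Mathlib
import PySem

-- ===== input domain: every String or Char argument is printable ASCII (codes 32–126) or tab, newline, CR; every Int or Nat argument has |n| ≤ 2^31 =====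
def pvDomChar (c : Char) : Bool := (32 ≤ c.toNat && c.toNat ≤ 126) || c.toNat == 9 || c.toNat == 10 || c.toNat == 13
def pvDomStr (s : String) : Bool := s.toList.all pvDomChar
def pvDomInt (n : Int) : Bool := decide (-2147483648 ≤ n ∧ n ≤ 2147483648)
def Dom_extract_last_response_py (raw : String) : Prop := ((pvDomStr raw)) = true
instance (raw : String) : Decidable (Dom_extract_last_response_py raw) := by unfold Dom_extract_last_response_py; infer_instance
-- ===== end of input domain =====

-- B replaces A's locate-last-marker-then-rescan parse by a single forward-pass state
-- machine that resets its accumulated state at every HTTP/ line; objective: alternative.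
-- Return-value equivalence only (neither side mutates its argument).

-- ===== PORT A =====
-- one header line: ':' test, split(':',1), setdefault(key,[]).append(val)  (shared line-level helper: the same three Python statements appear in A and in B)
def pvHeaderStep (d : PySem.Dict String (List String)) (ln : String) : PySem.Dict String (List String) :=
  if PySem.Str.isIn ":" ln then
    let two := (PySem.Str.splitMax? ln ":" 1).getD []
    let key := PySem.Str.lower (PySem.Str.strip (PySem.List.pyGetD two 0 ""))
    let val := PySem.Str.strip (PySem.List.pyGetD two 1 "")
    PySem.Dict.modify d key [] (fun l => l ++ [val])
  else d

-- A's 'for j in range(last_http, len(lines))' loop with break, carried state (status, headers, end_headers_idx)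
def pvALoop (lines : List String) (lastHttp : Int) :
    List Int → (String × PySem.Dict String (List String) × Int) →
    String × PySem.Dict String (List String) × Int
  | [], st => st
  | j :: js, (status, headers, endIdx) =>
    let ln := PySem.List.pyGetD lines j ""
    if j == lastHttp then
      let parts := PySem.Str.split₀ ln
      let status' := if decide (2 ≤ parts.length) && PySem.Str.strIsdigit (PySem.List.pyGetD parts 1 "")
        then PySem.List.pyGetD parts 1 "" else status
      pvALoop lines lastHttp js (status', headers, endIdx)
    else if PySem.Str.strip ln == "" then
      (status, headers, j)
    else
      pvALoop lines lastHttp js (status, pvHeaderStep headers ln, endIdx)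

def extract_last_response_py (raw : String) : String × (List (String × List String)) × String :=
  let lines := PySem.Str.splitlines raw
  let lastHttp := (PySem.List.enumerate lines).foldl
    (fun acc p => if PySem.Str.startswith (PySem.Str.upper p.2) "HTTP/" then p.1 else acc) (-1)
  if lastHttp == -1 then ("?", [], raw)
  else
    let r := pvALoop lines lastHttp (PySem.List.pyRange lastHttp lines.length)
      ("?", PySem.Dict.empty, (lines.length : Int) - 1)
    let body := if r.2.2 + 1 < (lines.length : Int)
      then PySem.Str.join "\n" (PySem.List.slice lines (some (r.2.2 + 1)) none) else ""
    (r.1, PySem.Dict.items r.2.1, body)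

-- ===== PORT B =====
-- status parsed from the HTTP/ line (B's 'parts = ln.split(); status = parts[1] if … else "?"')
def pvStatusOf (ln : String) : String :=
  let parts := PySem.Str.split₀ ln
  if decide (2 ≤ parts.length) && PySem.Str.strIsdigit (PySem.List.pyGetD parts 1 "")
  then PySem.List.pyGetD parts 1 "" else "?"

-- one iteration of B's state machine; state = (found, in_headers, status, headers, body)
def pvStep (st : Bool × Bool × String × PySem.Dict String (List String) × List String)
    (ln : String) : Bool × Bool × String × PySem.Dict String (List String) × List String :=
  if PySem.Str.startswith (PySem.Str.upper ln) "HTTP/" then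
    (true, true, pvStatusOf ln, PySem.Dict.empty, [])
  else if !st.1 then st
  else if st.2.1 then
    if PySem.Str.strip ln == "" then (st.1, false, st.2.2.1, st.2.2.2.1, st.2.2.2.2)
    else (st.1, st.2.1, st.2.2.1, pvHeaderStep st.2.2.2.1 ln, st.2.2.2.2)
  else (st.1, st.2.1, st.2.2.1, st.2.2.2.1, st.2.2.2.2 ++ [ln])

def extract_last_response_py_alt (raw : String) : String × (List (String × List String)) × String :=
  let st := (PySem.Str.splitlines raw).foldl pvStep (false, true, "?", PySem.Dict.empty, [])
  if st.1 then (st.2.2.1, PySem.Dict.items st.2.2.2.1, PySem.Str.join "\n" st.2.2.2.2)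
  else ("?", [], raw)

-- ===== PRECONDITION & SPEC =====
def Spec_extract_last_response_py (raw : String) (out : String × (List (String × List String)) × String) : Prop := out = extract_last_response_py_alt raw
instance (raw : String) (out : String × (List (String × List String)) × String) : Decidable (Spec_extract_last_response_py raw out) := by unfold Spec_extract_last_response_py; infer_instance

-- ===== CLAIM (what is proved, stated in full; the proofs are below) =====
def Claim_equal_extract_last_response_py : Prop := ∀ (raw : String), Dom_extract_last_response_py raw → Spec_extract_last_response_py raw (extract_last_response_py raw)

-- ===== LEMMAS AND PROOFS =====

-- proof-only helper: index of the last HTTP/ line, the bridge between the two programs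
def pvFindLastHttp (lines : List String) : Nat → Option Nat
  | 0 => none
  | n + 1 =>
    if PySem.Str.startswith (PySem.Str.upper (PySem.List.pyGetD lines (n : Int) "")) "HTTP/"
    then some n else pvFindLastHttp lines n

theorem pvFind_succ (lines : List String) (n : Nat) :
    pvFindLastHttp lines (n + 1) =
    (if PySem.Str.startswith (PySem.Str.upper (PySem.List.pyGetD lines (n : Int) "")) "HTTP/"
     then some n else pvFindLastHttp lines n) := rfl

theorem pvFind_lt {lines : List String} {n m : Nat}
    (h : pvFindLastHttp lines n = some m) : m < n := by
  induction n with
  | zero => simp [pvFindLastHttp] at h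
  | succ n ih =>
    rw [pvFind_succ] at h
    split at h
    · simp at h; omega
    · exact Nat.lt_succ_of_lt (ih h)

theorem pvFind_none {lines : List String} {n : Nat} (h : pvFindLastHttp lines n = none) :
    ∀ j, j < n →
      PySem.Str.startswith (PySem.Str.upper (PySem.List.pyGetD lines (j : Int) "")) "HTTP/" = false := by
  induction n with
  | zero => intro j hj; omega
  | succ n ih =>
    rw [pvFind_succ] at h
    by_cases hc : PySem.Str.startswith (PySem.Str.upper (PySem.List.pyGetD lines (n : Int) "")) "HTTP/" = true
    · rw [if_pos hc] at h; exact absurd h (by simp)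
    · rw [if_neg hc] at h
      intro j hj
      rcases Nat.lt_succ_iff_lt_or_eq.mp hj with h' | h'
      · exact ih h j h'
      · subst h'; exact Bool.eq_false_iff.mpr hc

theorem pvFind_some_http {lines : List String} {n i : Nat}
    (h : pvFindLastHttp lines n = some i) :
    PySem.Str.startswith (PySem.Str.upper (PySem.List.pyGetD lines (i : Int) "")) "HTTP/" = true := by
  induction n with
  | zero => simp [pvFindLastHttp] at h
  | succ n ih =>
    rw [pvFind_succ] at h
    by_cases hc : PySem.Str.startswith (PySem.Str.upper (PySem.List.pyGetD lines (n : Int) "")) "HTTP/" = true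
    · rw [if_pos hc] at h; cases h; exact hc
    · rw [if_neg hc] at h; exact ih h

theorem pvFind_some_after {lines : List String} {n i : Nat}
    (h : pvFindLastHttp lines n = some i) :
    ∀ j, i < j → j < n →
      PySem.Str.startswith (PySem.Str.upper (PySem.List.pyGetD lines (j : Int) "")) "HTTP/" = false := by
  induction n with
  | zero => simp [pvFindLastHttp] at h
  | succ n ih =>
    rw [pvFind_succ] at h
    intro j hij hjn
    by_cases hc : PySem.Str.startswith (PySem.Str.upper (PySem.List.pyGetD lines (n : Int) "")) "HTTP/" = true
    · rw [if_pos hc] at h; cases h; omega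
    · rw [if_neg hc] at h
      rcases Nat.lt_succ_iff_lt_or_eq.mp hjn with h' | h'
      · exact ih h j hij h'
      · subst h'; exact Bool.eq_false_iff.mpr hc

-- A's forward foldl last-match equals the bridge's backward characterisation
theorem pvFind_append {xs : List String} (x : String) {n : Nat} (hn : n ≤ xs.length) :
    pvFindLastHttp (xs ++ [x]) n = pvFindLastHttp xs n := by
  induction n with
  | zero => rfl
  | succ n ih =>
    rw [pvFind_succ, pvFind_succ]
    have h0 : PySem.List.pyGetD (xs ++ [x]) (n : Int) "" = PySem.List.pyGetD xs (n : Int) "" := by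
      rw [PySem.List.pyGetD_eq_getElem _ _ (by positivity) (by simp; omega),
          PySem.List.pyGetD_eq_getElem _ _ (by positivity) (by exact_mod_cast hn)]
      simp [List.getElem_append_left (by omega : n < xs.length)]
    rw [h0, ih (by omega)]

theorem pvLast_eq (lines : List String) :
    (PySem.List.enumerate lines).foldl
      (fun acc p => if PySem.Str.startswith (PySem.Str.upper p.2) "HTTP/" then p.1 else acc) (-1) =
    (match pvFindLastHttp lines lines.length with
     | none => (-1 : Int)
     | some n => (n : Int)) := by
  induction lines using List.reverseRecOn with
  | nil => rfl
  | append_singleton xs x ih =>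
    rw [PySem.List.enumerate_append, List.foldl_append, ih]
    have h1 : pvFindLastHttp (xs ++ [x]) (xs ++ [x]).length =
        if PySem.Str.startswith (PySem.Str.upper x) "HTTP/" then some xs.length
        else pvFindLastHttp xs xs.length := by
      have hlen : (xs ++ [x]).length = xs.length + 1 := by simp
      have hx : PySem.List.pyGetD (xs ++ [x]) (xs.length : Int) "" = x := by
        rw [PySem.List.pyGetD_eq_getElem _ _ (by positivity) (by simp)]
        simp
      rw [hlen, pvFind_succ, hx, pvFind_append x le_rfl]
    rw [h1]
    by_cases hp : PySem.Str.startswith (PySem.Str.upper x) "HTTP/"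
    · simp only [PySem.List.enumerate, List.foldl_cons, List.foldl_nil, hp, if_true]
      norm_num
    · simp only [PySem.List.enumerate, List.foldl_cons, List.foldl_nil, hp,
        Bool.false_eq_true, if_false]

-- ===== A-side characterisation (A's loop as a split at the first blank line) =====

-- the tail of A's loop (indices past lastHttp) as a structural loop
def pvTail (m : Nat) : List String → (String × PySem.Dict String (List String) × Int) →
    String × PySem.Dict String (List String) × Int
  | [], st => st
  | ln :: rest, (status, headers, endIdx) =>
    if PySem.Str.strip ln == "" then (status, headers, (m : Int))
    else pvTail (m + 1) rest (status, pvHeaderStep headers ln, endIdx)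

theorem pvALoop_eq_tail (lines : List String) (lastHttp : Int) :
    ∀ (rest : List String) (m : Nat) (st : String × PySem.Dict String (List String) × Int),
    lines.drop m = rest → lastHttp < (m : Int) →
    pvALoop lines lastHttp (PySem.List.pyRange (m : Int) lines.length) st = pvTail m rest st := by
  intro rest
  induction rest with
  | nil =>
    intro m st hdrop _
    have hm : lines.length ≤ m := by
      by_contra h
      have := congrArg List.length hdrop
      simp at this; omega
    have : PySem.List.pyRange (m : Int) lines.length = [] := by
      simp [PySem.List.pyRange]; omega
    rw [this]; rfl
  | cons ln rest ih =>
    intro m st hdrop hlt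
    obtain ⟨status, headers, endIdx⟩ := st
    have hm : m < lines.length := by
      by_contra h
      rw [List.drop_eq_nil_of_le (by omega)] at hdrop; exact (List.cons_ne_nil _ _ hdrop.symm).elim
    have hcons : PySem.List.pyRange (m : Int) lines.length =
        (m : Int) :: PySem.List.pyRange ((m : Int) + 1) lines.length :=
      PySem.List.pyRange_one_cons (by exact_mod_cast hm)
    have hln : PySem.List.pyGetD lines (m : Int) "" = ln := by
      rw [PySem.List.pyGetD_eq_getElem _ _ (by positivity) (by exact_mod_cast hm)]
      have := (List.getElem_drop (xs := lines) (i := m) (j := 0)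
        (h := by simp [hdrop])).symm
      simp only [hdrop, List.getElem_cons_zero] at this
      simpa using this
    have hne : ((m : Int) == lastHttp) = false := by simp; omega
    rw [hcons]
    show pvALoop lines lastHttp _ _ = _
    unfold pvALoop
    rw [hln, hne]
    simp only [Bool.false_eq_true, if_false]
    by_cases hb : PySem.Str.strip ln == ""
    · rw [hb]
      simp [pvTail, hb]
    · rw [if_neg (by simpa using hb)]
      have hdrop' : lines.drop (m + 1) = rest := by
        have := congrArg (List.drop 1) hdrop
        simpa [List.drop_drop] using this
      have := ih (m + 1) (status, pvHeaderStep headers ln, endIdx) hdrop' (by push_cast; omega)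
      push_cast at this ⊢
      rw [this]
      simp [pvTail, hb]

theorem pvALoop_first (lines : List String) (i : Int) (js : List Int)
    (status : String) (headers : PySem.Dict String (List String)) (endIdx : Int) :
    pvALoop lines i (i :: js) (status, headers, endIdx) =
    pvALoop lines i js
      ((if decide (2 <= (PySem.Str.split₀ (PySem.List.pyGetD lines i "")).length) &&
            PySem.Str.strIsdigit
              (PySem.List.pyGetD (PySem.Str.split₀ (PySem.List.pyGetD lines i "")) 1 "")
        then PySem.List.pyGetD (PySem.Str.split₀ (PySem.List.pyGetD lines i "")) 1 ""
        else status), headers, endIdx) := by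
  conv_lhs => rw [pvALoop]
  simp

-- the structural loop splits at the first blank line
theorem pvTail_split (rest : List String) :
    ∀ (m : Nat) (status : String) (headers : PySem.Dict String (List String)) (endIdx : Int),
    pvTail m rest (status, headers, endIdx) =
    (match rest.findIdx? (fun ln => PySem.Str.strip ln == "") with
     | none => (status, rest.foldl pvHeaderStep headers, endIdx)
     | some k => (status, (rest.take k).foldl pvHeaderStep headers, ((m + k : Nat) : Int))) := by
  induction rest with
  | nil => intro m status headers endIdx; rfl
  | cons ln rest ih =>
    intro m status headers endIdx
    rw [List.findIdx?_cons]
    by_cases hb : PySem.Str.strip ln == ""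
    · simp [pvTail, hb]
    · simp only [pvTail, hb, Bool.false_eq_true, if_false]
      rw [ih (m + 1)]
      cases h : rest.findIdx? (fun ln => PySem.Str.strip ln == "") with
      | none => simp
      | some k =>
        simp only [Option.map_some, List.take_succ_cons, List.foldl_cons, Prod.mk.injEq]
        refine ⟨trivial, trivial, ?_⟩
        push_cast; ring

-- ===== B-side characterisation (the state machine after the last HTTP/ line) =====

theorem pvStep_eq_http (st : Bool × Bool × String × PySem.Dict String (List String) × List String)
    (ln : String) (h : PySem.Str.startswith (PySem.Str.upper ln) "HTTP/" = true) :
    pvStep st ln = (true, true, pvStatusOf ln, PySem.Dict.empty, []) := by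
  simp only [pvStep]
  rw [if_pos h]

theorem pvStep_eq_nf (b : Bool) (s : String) (h0 : PySem.Dict String (List String))
    (b0 : List String) (ln : String)
    (h : PySem.Str.startswith (PySem.Str.upper ln) "HTTP/" = false) :
    pvStep (false, b, s, h0, b0) ln = (false, b, s, h0, b0) := by
  simp only [pvStep]
  rw [if_neg (Bool.eq_false_iff.mp h)]
  rfl

theorem pvStep_eq_blank (s : String) (h0 : PySem.Dict String (List String)) (b0 : List String)
    (ln : String) (h : PySem.Str.startswith (PySem.Str.upper ln) "HTTP/" = false)
    (hb : (PySem.Str.strip ln == "") = true) :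
    pvStep (true, true, s, h0, b0) ln = (true, false, s, h0, b0) := by
  simp only [pvStep]
  rw [if_neg (Bool.eq_false_iff.mp h), hb]
  rfl

theorem pvStep_eq_hdr (s : String) (h0 : PySem.Dict String (List String)) (b0 : List String)
    (ln : String) (h : PySem.Str.startswith (PySem.Str.upper ln) "HTTP/" = false)
    (hb : (PySem.Str.strip ln == "") = false) :
    pvStep (true, true, s, h0, b0) ln = (true, true, s, pvHeaderStep h0 ln, b0) := by
  simp only [pvStep]
  rw [if_neg (Bool.eq_false_iff.mp h), hb]
  rfl

theorem pvStep_eq_body' (s : String) (h0 : PySem.Dict String (List String)) (b0 : List String)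
    (ln : String) (h : PySem.Str.startswith (PySem.Str.upper ln) "HTTP/" = false) :
    pvStep (true, false, s, h0, b0) ln = (true, false, s, h0, b0 ++ [ln]) := by
  simp only [pvStep]
  rw [if_neg (Bool.eq_false_iff.mp h)]
  rfl

theorem pvStep_notfound (lines : List String)
    (hH : ∀ ln ∈ lines, PySem.Str.startswith (PySem.Str.upper ln) "HTTP/" = false) :
    ∀ (b : Bool) (s : String) (h0 : PySem.Dict String (List String)) (b0 : List String),
    lines.foldl pvStep (false, b, s, h0, b0) = (false, b, s, h0, b0) := by
  induction lines with
  | nil => intro b s h0 b0; rfl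
  | cons ln rest ih =>
    intro b s h0 b0
    rw [List.foldl_cons, pvStep_eq_nf _ _ _ _ _ (hH ln (by simp))]
    exact ih (fun l hl => hH l (List.mem_cons_of_mem _ hl)) b s h0 b0

theorem pvStep_body (rest : List String)
    (hH : ∀ ln ∈ rest, PySem.Str.startswith (PySem.Str.upper ln) "HTTP/" = false) :
    ∀ (s : String) (h0 : PySem.Dict String (List String)) (b0 : List String),
    rest.foldl pvStep (true, false, s, h0, b0) = (true, false, s, h0, b0 ++ rest) := by
  induction rest with
  | nil => intro s h0 b0; simp
  | cons ln rest ih =>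
    intro s h0 b0
    rw [List.foldl_cons, pvStep_eq_body' _ _ _ _ (hH ln (by simp)),
      ih (fun l hl => hH l (List.mem_cons_of_mem _ hl))]
    simp

theorem pvStep_suffix (rest : List String)
    (hH : ∀ ln ∈ rest, PySem.Str.startswith (PySem.Str.upper ln) "HTTP/" = false) :
    ∀ (s : String) (h0 : PySem.Dict String (List String)) (b0 : List String),
    rest.foldl pvStep (true, true, s, h0, b0) =
    (match rest.findIdx? (fun ln => PySem.Str.strip ln == "") with
     | none => (true, true, s, rest.foldl pvHeaderStep h0, b0)
     | some k => (true, false, s, (rest.take k).foldl pvHeaderStep h0, b0 ++ rest.drop (k + 1))) := by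
  induction rest with
  | nil => intro s h0 b0; rfl
  | cons ln rest ih =>
    intro s h0 b0
    have hln := hH ln (by simp)
    have hH' : ∀ l ∈ rest, PySem.Str.startswith (PySem.Str.upper l) "HTTP/" = false :=
      fun l hl => hH l (List.mem_cons_of_mem _ hl)
    rw [List.findIdx?_cons]
    by_cases hb : (PySem.Str.strip ln == "") = true
    · rw [List.foldl_cons, pvStep_eq_blank _ _ _ _ hln hb, pvStep_body rest hH', hb]
      simp
    · rw [List.foldl_cons, pvStep_eq_hdr _ _ _ _ hln (Bool.eq_false_iff.mpr hb),
        ih hH', Bool.eq_false_iff.mpr hb]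
      cases h : rest.findIdx? (fun ln => PySem.Str.strip ln == "") with
      | none => simp
      | some k => simp

-- ===== VERDICT (by name: the statement is the Claim_ definition above) =====
theorem extract_last_response_py_spec : Claim_equal_extract_last_response_py := by
  intro raw _
  simp only [Spec_extract_last_response_py, extract_last_response_py,
    extract_last_response_py_alt]
  have hlast := pvLast_eq (PySem.Str.splitlines raw)
  simp only [hlast]
  generalize hL : PySem.Str.splitlines raw = lines at *
  have hidx : ∀ (j : Nat) (hj : j < lines.length), PySem.List.pyGetD lines (j : Int) "" = lines[j] := by
    intro j hj
    rw [PySem.List.pyGetD_eq_getElem _ _ (by positivity) (by exact_mod_cast hj)]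
    simp
  cases hfind : pvFindLastHttp lines lines.length with
  | none =>
    have hno : ∀ ln ∈ lines, PySem.Str.startswith (PySem.Str.upper ln) "HTTP/" = false := by
      intro ln hln
      obtain ⟨j, hj, rfl⟩ := List.mem_iff_getElem.mp hln
      rw [← hidx j hj]
      exact pvFind_none hfind j hj
    rw [pvStep_notfound lines hno]
    simp
  | some i =>
    have hi : i < lines.length := pvFind_lt hfind
    -- B side: split the fold at the last HTTP/ line
    have hhttps : PySem.Str.startswith (PySem.Str.upper lines[i]) "HTTP/" = true := by
      rw [← hidx i hi]; exact pvFind_some_http hfind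
    have hdropcons : lines.drop i = lines[i] :: lines.drop (i + 1) :=
      List.drop_eq_getElem_cons hi
    have hsplit : lines = lines.take i ++ lines[i] :: lines.drop (i + 1) := by
      conv_lhs => rw [← List.take_append_drop i lines]
      rw [hdropcons]
    have hBfold : lines.foldl pvStep (false, true, "?", PySem.Dict.empty, []) =
        (lines.drop (i + 1)).foldl pvStep (true, true, pvStatusOf lines[i], PySem.Dict.empty, []) := by
      conv_lhs => rw [hsplit]
      rw [List.foldl_append, List.foldl_cons, pvStep_eq_http _ _ hhttps]
    have hnoafter : ∀ ln ∈ lines.drop (i + 1),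
        PySem.Str.startswith (PySem.Str.upper ln) "HTTP/" = false := by
      intro ln hln
      obtain ⟨j, hj, rfl⟩ := List.mem_iff_getElem.mp hln
      rw [List.length_drop] at hj
      rw [List.getElem_drop]
      rw [← hidx (i + 1 + j) (by omega)]
      exact pvFind_some_after hfind (i + 1 + j) (by omega) (by omega)
    rw [hBfold, pvStep_suffix _ hnoafter]
    -- A side
    simp only [show (match some i with | none => (-1:Int) | some n => (n:Int)) = (i : Int) from rfl]
    have hne : (((i : Int)) == -1) = false := by simp
    simp only [hne, Bool.false_eq_true, if_false]
    rw [PySem.List.pyRange_one_cons (show (i:Int) < (lines.length:Int) by exact_mod_cast hi)]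
    rw [pvALoop_first]
    rw [show ((i:Int)+1) = ((i+1 : Nat) : Int) by push_cast; ring]
    rw [pvALoop_eq_tail lines (i:Int) (lines.drop (i+1)) (i+1) _ rfl (by push_cast; omega)]
    rw [pvTail_split]
    have hstat : (if decide (2 <= (PySem.Str.split₀ (PySem.List.pyGetD lines (i:Int) "")).length) &&
            PySem.Str.strIsdigit
              (PySem.List.pyGetD (PySem.Str.split₀ (PySem.List.pyGetD lines (i:Int) "")) 1 "")
        then PySem.List.pyGetD (PySem.Str.split₀ (PySem.List.pyGetD lines (i:Int) "")) 1 ""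
        else "?") = pvStatusOf lines[i] := by
      rw [hidx i hi]; rfl
    rw [hstat]
    cases hfi : List.findIdx? (fun ln => PySem.Str.strip ln == "") (List.drop (i+1) lines) with
    | none =>
      refine Prod.ext ?_ (Prod.ext ?_ ?_)
      · rfl
      · rfl
      · show (if ((lines.length : Int) - 1) + 1 < (lines.length : Int) then _ else "") =
          PySem.Str.join "\n" []
        rw [if_neg (by omega)]
        rfl
    | some k =>
      have hk : k < (List.drop (i+1) lines).length :=
        (List.findIdx?_eq_some_iff_findIdx_eq.mp hfi).1
      rw [List.length_drop] at hk
      refine Prod.ext ?_ (Prod.ext ?_ ?_)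
      · rfl
      · rfl
      · show (if ((i+1+k : Nat) : Int) + 1 < (lines.length : Int) then
            PySem.Str.join "\n" (PySem.List.slice lines (some (((i+1+k : Nat) : Int) + 1))) else "") =
          PySem.Str.join "\n" ([] ++ (lines.drop (i+1)).drop (k+1))
        rw [List.nil_append, List.drop_drop]
        by_cases hlt : ((i+1+k : Nat) : Int) + 1 < (lines.length : Int)
        · rw [if_pos hlt, PySem.List.slice_from lines (by positivity)]
          rw [show ((((i+1+k : Nat) : Int) + 1).toNat) = i+1+(k+1) by omega]
        · rw [if_neg hlt]
          rw [show List.drop (i+1+(k+1)) lines = [] from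
            List.drop_eq_nil_of_le (by push_cast at hlt; omega)]
          rfl
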